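-- pv_equiv track=rewrite | github.com/terry57tt/PIDR | src/charts/metric.py | tokenize_phrase
-- ===== SOURCE A (Python) =====
-- def tokenize_phrase(phrase):
--     tokens = []
--     current_token = ""
--     for char in phrase:
--         if char in ("#", "&"):
--             char = " "
--         current_token += char
--     tokens = current_token.split()
--     return tokens
-- ===== SOURCE B (Python) =====
-- def tokenize_phrase(phrase):
--     tokens = []
--     current = ""
--     for char in phrase:
--         if char in ("#", "&") or char.isspace():
--             if current:
--                 tokens.append(current)
--                 current = ""
--         else:
--             current += char
--     if current:
--         tokens.append(current)
--     return tokens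
-- ===== Notes on version B (the rewrite author's own statement) =====
-- stated objective: alternative
-- what changed: B is a single-pass manual tokenizer that flushes a running buffer at delimiters (#, & or whitespace), instead of A's two phases of rebuilding the string with # and & replaced by spaces and then calling str.split().
import Mathlib
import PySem

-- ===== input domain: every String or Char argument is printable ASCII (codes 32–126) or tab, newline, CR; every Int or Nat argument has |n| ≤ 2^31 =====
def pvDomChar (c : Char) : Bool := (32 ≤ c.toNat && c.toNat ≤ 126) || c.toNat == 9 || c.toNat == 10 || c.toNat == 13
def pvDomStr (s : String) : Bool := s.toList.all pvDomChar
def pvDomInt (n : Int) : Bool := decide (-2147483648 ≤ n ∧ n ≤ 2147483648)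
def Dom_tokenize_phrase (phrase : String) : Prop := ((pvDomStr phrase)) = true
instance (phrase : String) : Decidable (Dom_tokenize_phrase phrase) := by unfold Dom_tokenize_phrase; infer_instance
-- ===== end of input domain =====

-- B is a single-pass manual tokenizer (buffer flushed at #, & or whitespace) instead of
-- A's replace-then-str.split(); same result, stated as an alternative decomposition.

-- ===== PORT A =====
-- for char in phrase: if char in ("#","&"): char = " "; current_token += char
def tokenize_phrase (phrase : String) : List String :=
  let current_token : List Char :=
    phrase.toList.foldl
      (fun cur c => cur ++ [if c = '#' ∨ c = '&' then ' ' else c]) []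
  (PySem.Chars.split₀ current_token).map String.ofList

-- ===== PORT B =====
-- state = (tokens, current); delimiter flushes a non-empty buffer, other chars extend it
def tokenize_phrase_alt (phrase : String) : List String :=
  let st :=
    phrase.toList.foldl
      (fun (st : List (List Char) × List Char) c =>
        if c = '#' ∨ c = '&' ∨ PySem.Chars.isspace c then
          if st.2.isEmpty then st else (st.1 ++ [st.2], [])
        else (st.1, st.2 ++ [c]))
      ([], [])
  (if st.2.isEmpty then st.1 else st.1 ++ [st.2]).map String.ofList

-- ===== PRECONDITION & SPEC =====
def Spec_tokenize_phrase (phrase : String) (out : List String) : Prop := out = tokenize_phrase_alt phrase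
instance (phrase : String) (out : List String) : Decidable (Spec_tokenize_phrase phrase out) := by unfold Spec_tokenize_phrase; infer_instance

-- ===== CLAIM (what is proved, stated in full; the proofs are below) =====
def Claim_equal_tokenize_phrase : Prop := ∀ (phrase : String), Dom_tokenize_phrase phrase → Spec_tokenize_phrase phrase (tokenize_phrase phrase)

-- ===== LEMMAS AND PROOFS =====

-- A's replacement of '#'/'&' by ' '
def pvRepl (c : Char) : Char := if c = '#' ∨ c = '&' then ' ' else c

-- B's loop step
def pvStep (st : List (List Char) × List Char) (c : Char) : List (List Char) × List Char :=
  if c = '#' ∨ c = '&' ∨ PySem.Chars.isspace c then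
    if st.2.isEmpty then st else (st.1 ++ [st.2], [])
  else (st.1, st.2 ++ [c])

-- the delimiter tests of the two programs coincide after A's replacement
theorem pvRepl_isspace (c : Char) :
    PySem.Chars.isspace (pvRepl c) = (c = '#' ∨ c = '&' ∨ PySem.Chars.isspace c) := by
  unfold pvRepl
  by_cases h1 : c = '#' <;> by_cases h2 : c = '&' <;>
    simp [h1, h2] <;> decide

-- invariant relating A's split₀.go (reversed accumulators) to B's forward fold
theorem pvGo_eq (cs : List Char) (toks : List (List Char)) (cur : List Char) :
    PySem.Chars.split₀.go (cs.map pvRepl) cur.reverse toks.reverse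
      = (let st := cs.foldl pvStep (toks, cur)
         if st.2.isEmpty then st.1 else st.1 ++ [st.2]) := by
  induction cs generalizing toks cur with
  | nil =>
      by_cases h : cur.isEmpty <;>
        simp [PySem.Chars.split₀.go, List.foldl, h]
  | cons c rest ih =>
      simp only [List.map_cons, List.foldl_cons, PySem.Chars.split₀.go, pvRepl_isspace]
      by_cases hd : (c = '#' ∨ c = '&' ∨ PySem.Chars.isspace c)
      · simp only [hd, if_pos]
        by_cases hc : cur.isEmpty
        · have : cur = [] := by simpa using hc
          subst this
          simpa [pvStep, hd, hc] using ih toks []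
        · have h1 : cur.reverse.isEmpty = false := by
            simp [List.isEmpty_iff] at hc ⊢; exact hc
          have h2 : (cur.reverse.reverse :: toks.reverse) = (toks ++ [cur]).reverse := by
            simp
          rw [if_neg (by simp [h1]), h2]
          simpa [pvStep, hd, hc] using ih (toks ++ [cur]) []
      · rw [not_or, not_or] at hd
        obtain ⟨h1, h2, h3⟩ := hd
        have hrepl : pvRepl c = c := by simp [pvRepl, h1, h2]
        rw [hrepl]
        simp only [h3, Bool.false_eq_true]
        have : (c :: cur.reverse) = (cur ++ [c]).reverse := by simp
        rw [this]
        simpa [pvStep, h1, h2, h3] using ih toks (cur ++ [c])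

-- A's character loop builds exactly the replaced character list
theorem pvBuild_eq (cs : List Char) :
    cs.foldl (fun cur c => cur ++ [if c = '#' ∨ c = '&' then ' ' else c]) [] = cs.map pvRepl := by
  simpa [pvRepl] using PySem.List.foldl_append_singleton_eq_map pvRepl cs []

-- ===== VERDICT (by name: the statement is the Claim_ definition above) =====
theorem tokenize_phrase_spec : Claim_equal_tokenize_phrase := by
  intro phrase _
  show tokenize_phrase phrase = tokenize_phrase_alt phrase
  have h2 := pvGo_eq phrase.toList [] []
  simp only [List.reverse_nil] at h2
  calc tokenize_phrase phrase
      = (PySem.Chars.split₀.go (phrase.toList.map pvRepl) [] []).map String.ofList := by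
        unfold tokenize_phrase
        rw [pvBuild_eq]
        rfl
    _ = tokenize_phrase_alt phrase := by
        rw [h2]
        rfl
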